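-- pv_equiv track=rewrite | github.com/dacugo/Python | Pruebas.py | listaFacultades
-- ===== SOURCE A (Python) =====
-- def listaFacultades (info:dict)->dict:
-- 	#Función que se encarga de crear y ordenar la lista de las facultades
-- 	facultades = set()
-- 	for value in info.values():
-- 		materias = value['materias']
-- 		i = 0
-- 		while i <= len(materias) - 1:
-- 			facultad = materias[i]['facultad']
-- 			facultades.add(facultad)
-- 			i += 1
-- 	facultades = sorted(facultades)
-- 	return facultades
-- ===== SOURCE B (Python) =====
-- def listaFacultades(info: dict) -> dict:
--     # Sort-then-sweep: gather every facultad, sort the full list,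
--     # then drop adjacent duplicates in one linear pass.
--     todas = []
--     for value in info.values():
--         for materia in value['materias']:
--             todas.append(materia['facultad'])
--     todas.sort()
--     resultado = []
--     for facultad in todas:
--         if not resultado or facultad != resultado[-1]:
--             resultado.append(facultad)
--     return resultado
-- ===== Notes on version B (the rewrite author's own statement) =====
-- stated objective: alternative
-- what changed: Replaces the hash-set accumulation plus index-driven while loop by gathering all facultades into a plain list, sorting it, and removing adjacent duplicates in a single linear sweep.
import Mathlib
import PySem

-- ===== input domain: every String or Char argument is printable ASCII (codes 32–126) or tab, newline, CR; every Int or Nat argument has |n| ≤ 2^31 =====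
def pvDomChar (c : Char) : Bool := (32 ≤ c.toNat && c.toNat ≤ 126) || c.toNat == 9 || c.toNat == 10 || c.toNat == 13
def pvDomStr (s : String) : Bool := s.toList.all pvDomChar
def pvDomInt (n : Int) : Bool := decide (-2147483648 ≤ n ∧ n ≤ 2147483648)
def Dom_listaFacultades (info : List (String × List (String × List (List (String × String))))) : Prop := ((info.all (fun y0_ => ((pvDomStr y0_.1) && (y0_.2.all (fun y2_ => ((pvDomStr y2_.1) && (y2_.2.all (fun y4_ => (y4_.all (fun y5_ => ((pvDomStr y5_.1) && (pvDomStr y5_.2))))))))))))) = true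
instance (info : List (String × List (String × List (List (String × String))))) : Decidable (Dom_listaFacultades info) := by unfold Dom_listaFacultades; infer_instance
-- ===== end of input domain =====

-- B gathers all facultades into one list, sorts it, and sweeps out adjacent
-- duplicates, instead of A's hash-set accumulation with an index-driven while loop.

-- ===== PORT A =====
-- value['materias'] / materia['facultad'] ported with getD; Pre_ guarantees the keys exist.
def listaFacultades (info : List (String × List (String × List (List (String × String))))) : List String :=
  let facultades : PySem.Set String :=
    (PySem.Dict.ofList info).values.foldl (fun facultades value =>
      let materias := (PySem.Dict.ofList value).getD "materias" []
      (PySem.List.pyRange 0 materias.length 1).foldl (fun s i =>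
        PySem.Set.add s ((PySem.Dict.ofList (PySem.List.pyGetD materias i [])).getD "facultad" ""))
        facultades) PySem.Set.empty
  PySem.List.sorted facultades (fun x => x) false

-- ===== PORT B =====
def listaFacultades_alt (info : List (String × List (String × List (List (String × String))))) : List String :=
  let todas : List String :=
    (PySem.Dict.ofList info).values.foldl (fun todas value =>
      ((PySem.Dict.ofList value).getD "materias" []).foldl (fun todas materia =>
        todas ++ [(PySem.Dict.ofList materia).getD "facultad" ""]) todas) []
  let srt := PySem.List.sorted todas (fun x => x) false
  srt.foldl (fun resultado facultad =>
    if resultado.getLast? = some facultad then resultado else resultado ++ [facultad]) []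

-- ===== PRECONDITION & SPEC =====
-- Pre_ excludes exactly the inputs where the Python A raises KeyError:
-- some value lacks the key 'materias', or some materia lacks the key 'facultad'.
def Pre_listaFacultades (info : List (String × List (String × List (List (String × String))))) : Prop :=
  ∀ value ∈ (PySem.Dict.ofList info).values,
    (PySem.Dict.ofList value).contains "materias" = true ∧
    ∀ materia ∈ (PySem.Dict.ofList value).getD "materias" [],
      (PySem.Dict.ofList materia).contains "facultad" = true
instance (info : List (String × List (String × List (List (String × String))))) : Decidable (Pre_listaFacultades info) := by unfold Pre_listaFacultades; infer_instance

def pvWitness_listaFacultades : (List (String × List (String × List (List (String × String))))) :=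
  [("g1", [("materias", [[("facultad", "ing"), ("nombre", "a")], [("facultad", "arte")]])]),
   ("g2", [("materias", [[("facultad", "ing")]])])]

def Spec_listaFacultades (info : List (String × List (String × List (List (String × String))))) (out : List String) : Prop := out = listaFacultades_alt info
instance (info : List (String × List (String × List (List (String × String))))) (out : List String) : Decidable (Spec_listaFacultades info out) := by unfold Spec_listaFacultades; infer_instance

-- ===== CLAIM (what is proved, stated in full; the proofs are below) =====
def Claim_equal_listaFacultades : Prop := ∀ (info : List (String × List (String × List (List (String × String))))), Dom_listaFacultades info → Pre_listaFacultades info → Spec_listaFacultades info (listaFacultades info)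

-- ===== LEMMAS AND PROOFS =====

-- the facultad of a materia-dict, and the materias of a value-dict
def pvFac (m : List (String × String)) : String := (PySem.Dict.ofList m).getD "facultad" ""
def pvMats (v : List (String × List (List (String × String)))) : List (List (String × String)) :=
  (PySem.Dict.ofList v).getD "materias" []

-- adjacent-duplicate sweep, structurally
def pvSweep : List String → List String
  | [] => []
  | [x] => [x]
  | x :: y :: t => if x = y then pvSweep (y :: t) else x :: pvSweep (y :: t)

theorem pvSweep_mem : ∀ (l : List String) (x : String), x ∈ pvSweep l ↔ x ∈ l := by
  intro l
  induction l with
  | nil => simp [pvSweep]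
  | cons a t ih =>
    intro x
    cases t with
    | nil => simp [pvSweep]
    | cons b t' =>
      simp only [pvSweep]
      split
      · next h => subst h; rw [ih]; simp
      · simp only [List.mem_cons]; rw [ih]; simp

theorem pvSweep_pairwise : ∀ (l : List String), l.Pairwise (· ≤ ·) → (pvSweep l).Pairwise (· < ·) := by
  intro l
  induction l with
  | nil => intro _; simp [pvSweep]
  | cons a t ih =>
    intro hp
    cases t with
    | nil => simp [pvSweep]
    | cons b t' =>
      have hp' : (b :: t').Pairwise (· ≤ ·) := hp.tail
      simp only [pvSweep]
      split
      · exact ih hp'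
      · next hne =>
        refine List.Pairwise.cons ?_ (ih hp')
        intro z hz
        rw [pvSweep_mem] at hz
        have hab : a ≤ b := (List.pairwise_cons.mp hp).1 b (by simp)
        have halt : a < b := lt_of_le_of_ne hab hne
        rcases List.mem_cons.mp hz with rfl | hz'
        · exact halt
        · exact lt_of_lt_of_le halt ((List.pairwise_cons.mp hp').1 z hz')

-- the foldl sweep of B equals pvSweep
theorem pvSweep_foldl_aux : ∀ (l acc : List String) (a : String),
    l.foldl (fun r f => if r.getLast? = some f then r else r ++ [f]) (acc ++ [a])
      = acc ++ pvSweep (a :: l) := by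
  intro l
  induction l with
  | nil => intro acc a; simp [pvSweep]
  | cons b t ih =>
    intro acc a
    simp only [List.foldl_cons, List.getLast?_concat]
    by_cases hab : a = b
    · subst hab
      rw [if_pos rfl, ih]
      simp [pvSweep]
    · rw [if_neg (by simpa using hab), ih (acc ++ [a]) b]
      simp [pvSweep, hab]

theorem pvSweep_foldl : ∀ (l : List String),
    l.foldl (fun r f => if r.getLast? = some f then r else r ++ [f]) []
      = pvSweep l := by
  intro l
  cases l with
  | nil => simp [pvSweep]
  | cons a t => simpa using pvSweep_foldl_aux t [] a

-- A's set accumulation is Set.ofList of the concatenated facultades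
theorem pvA_set_eq : ∀ (vs : List (List (String × List (List (String × String))))) (s : PySem.Set String),
    vs.foldl (fun facultades value =>
      let materias := (PySem.Dict.ofList value).getD "materias" []
      (PySem.List.pyRange 0 materias.length 1).foldl (fun s i =>
        PySem.Set.add s ((PySem.Dict.ofList (PySem.List.pyGetD materias i [])).getD "facultad" ""))
        facultades) s
    = PySem.Set.update s (vs.flatMap (fun v => (pvMats v).map pvFac)) := by
  intro vs
  induction vs with
  | nil => intro s; simp [PySem.Set.update]
  | cons v t ih =>
    intro s
    simp only [List.foldl_cons, List.flatMap_cons]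
    rw [PySem.Set.update_append, ← ih]
    congr 1
    rw [PySem.Set.update_map_eq_foldl_add]
    exact PySem.List.foldl_pyRange_zero_pyGetD' (pvMats v) []
      (fun s m => PySem.Set.add s (pvFac m)) s

-- B's list accumulation is the concatenated facultades
theorem pvInner_eq : ∀ (ms : List (List (String × String))) (a : List String),
    ms.foldl (fun todas materia =>
      todas ++ [(PySem.Dict.ofList materia).getD "facultad" ""]) a = a ++ ms.map pvFac := by
  intro ms
  induction ms with
  | nil => intro a; simp
  | cons m mt ihm =>
    intro a
    simp only [List.foldl_cons, List.map_cons]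
    rw [ihm]
    simp [pvFac]

theorem pvB_list_eq : ∀ (vs : List (List (String × List (List (String × String))))) (acc : List String),
    vs.foldl (fun todas value =>
      ((PySem.Dict.ofList value).getD "materias" []).foldl (fun todas materia =>
        todas ++ [(PySem.Dict.ofList materia).getD "facultad" ""]) todas) acc
    = acc ++ vs.flatMap (fun v => (pvMats v).map pvFac) := by
  intro vs
  induction vs with
  | nil => intro acc; simp
  | cons v t ih =>
    intro acc
    simp only [List.foldl_cons, List.flatMap_cons]
    rw [pvInner_eq, ih, List.append_assoc]
    rfl

-- ===== VERDICT (by name: the statement is the Claim_ definition above) =====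
theorem listaFacultades_spec : Claim_equal_listaFacultades := by
  intro info _ _
  unfold Spec_listaFacultades listaFacultades listaFacultades_alt
  rw [pvA_set_eq, pvB_list_eq, PySem.Set.update_empty]
  simp only [List.nil_append]
  rw [pvSweep_foldl]
  -- both sides are the strictly increasing arrangement of the elements of the big list
  apply PySem.List.sorted_eq_of_perm_of_pairwise_lt
  · rw [List.perm_ext_iff_of_nodup]
    · intro x
      rw [pvSweep_mem, PySem.List.mem_sorted, PySem.Set.mem_ofList]
    · exact (pvSweep_pairwise _ (PySem.List.sorted_pairwise _ (fun x => x))).nodup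
    · exact PySem.Set.nodup_ofList _
  · exact pvSweep_pairwise _ (PySem.List.sorted_pairwise _ (fun x => x))
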